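-- pv_equiv track=rewrite | github.com/awaisahmad10/UDLR-Game | letter_game.py | getMaxDeletions
-- ===== SOURCE A (Python) =====
-- def getMaxDeletions(s):
--     steps_del = 0
--     num_of_U = 0
--     num_of_D = 0
--     num_of_L = 0
--     num_of_R = 0
--     for i in s:
--         if i=="U":
--             num_of_U += 1
--         elif i=="D":
--             num_of_D += 1
--         elif i=="R":
--             num_of_R += 1
--         elif i=="L":
--             num_of_L += 1
--
--     if num_of_L == num_of_R:
--         steps_del += (num_of_R*2)
--     elif num_of_L > num_of_R:
--         steps_del += (num_of_R*2)
--     elif num_of_L < num_of_R: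
--         steps_del += (num_of_L*2)
--
--     if num_of_U == num_of_D:
--         steps_del += (num_of_D*2)
--     elif num_of_U > num_of_D:
--         steps_del += (num_of_D*2)
--     elif num_of_U < num_of_D:
--         steps_del += (num_of_U*2)
--
--     return steps_del
-- ===== SOURCE B (Python) =====
-- def getMaxDeletions(s):
--     # Greedy online pair-cancellation: each move cancels a pending opposite
--     # move (scoring 2 deletions) or becomes pending itself. No totals, no min.
--     deletions = 0
--     pend_U = pend_D = pend_L = pend_R = 0
--     for c in s:
--         if c == "U":
--             if pend_D > 0:
--                 pend_D -= 1
--                 deletions += 2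
--             else:
--                 pend_U += 1
--         elif c == "D":
--             if pend_U > 0:
--                 pend_U -= 1
--                 deletions += 2
--             else:
--                 pend_D += 1
--         elif c == "L":
--             if pend_R > 0:
--                 pend_R -= 1
--                 deletions += 2
--             else:
--                 pend_L += 1
--         elif c == "R":
--             if pend_L > 0:
--                 pend_L -= 1
--                 deletions += 2
--             else:
--                 pend_R += 1
--     return deletions
-- ===== Notes on version B (the rewrite author's own statement) =====
-- stated objective: alternative
-- what changed: Replaces A's count-everything-then-branch-on-totals scheme with a greedy online pair-cancellation scan: each move either cancels a pending opposite move (immediately scoring 2 deletions) or joins the pending pool, so the answer accumulates during the single pass and the post-loop ==/>/< cascade disappears entirely.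
import Mathlib
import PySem

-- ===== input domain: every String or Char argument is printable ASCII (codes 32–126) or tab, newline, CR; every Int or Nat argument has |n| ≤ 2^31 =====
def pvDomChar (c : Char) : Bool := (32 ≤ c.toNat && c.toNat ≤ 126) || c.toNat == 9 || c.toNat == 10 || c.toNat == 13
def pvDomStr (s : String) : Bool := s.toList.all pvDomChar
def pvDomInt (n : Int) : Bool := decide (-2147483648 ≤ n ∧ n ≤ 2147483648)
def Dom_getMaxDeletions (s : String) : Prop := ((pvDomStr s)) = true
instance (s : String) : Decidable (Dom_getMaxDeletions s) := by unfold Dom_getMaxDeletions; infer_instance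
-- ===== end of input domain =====

-- B replaces A's count-everything-then-branch scheme by a greedy online pair-cancellation
-- scan that accrues the answer during the pass (objective: alternative; same asymptotic cost).

-- ===== PORT A =====
-- the body of A's 'for i in s' loop, on the counter state (num_of_U, num_of_D, num_of_R, num_of_L)
def pvStepA (st : Int × Int × Int × Int) (i : Char) : Int × Int × Int × Int :=
  if i == 'U' then (st.1 + 1, st.2.1, st.2.2.1, st.2.2.2)
  else if i == 'D' then (st.1, st.2.1 + 1, st.2.2.1, st.2.2.2)
  else if i == 'R' then (st.1, st.2.1, st.2.2.1 + 1, st.2.2.2)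
  else if i == 'L' then (st.1, st.2.1, st.2.2.1, st.2.2.2 + 1)
  else st

def getMaxDeletions (s : String) : Int :=
  let c := s.toList.foldl pvStepA (0, 0, 0, 0)
  let numU := c.1
  let numD := c.2.1
  let numR := c.2.2.1
  let numL := c.2.2.2
  let steps1 : Int :=
    if numL == numR then numR * 2
    else if numL > numR then numR * 2
    else if numL < numR then numL * 2
    else 0
  let steps2 : Int :=
    if numU == numD then numD * 2
    else if numU > numD then numD * 2
    else if numU < numD then numU * 2
    else 0
  steps1 + steps2

-- ===== PORT B =====
-- B's loop body, on the state (deletions, pend_U, pend_D, pend_L, pend_R)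
def pvStepB (st : Int × Int × Int × Int × Int) (c : Char) : Int × Int × Int × Int × Int :=
  let (del, pU, pD, pL, pR) := st
  if c == 'U' then
    if pD > 0 then (del + 2, pU, pD - 1, pL, pR) else (del, pU + 1, pD, pL, pR)
  else if c == 'D' then
    if pU > 0 then (del + 2, pU - 1, pD, pL, pR) else (del, pU, pD + 1, pL, pR)
  else if c == 'L' then
    if pR > 0 then (del + 2, pU, pD, pL, pR - 1) else (del, pU, pD, pL + 1, pR)
  else if c == 'R' then
    if pL > 0 then (del + 2, pU, pD, pL - 1, pR) else (del, pU, pD, pL, pR + 1)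
  else st

def getMaxDeletions_alt (s : String) : Int :=
  (s.toList.foldl pvStepB (0, 0, 0, 0, 0)).1

-- ===== PRECONDITION & SPEC =====
def Spec_getMaxDeletions (s : String) (out : Int) : Prop := out = getMaxDeletions_alt s
instance (s : String) (out : Int) : Decidable (Spec_getMaxDeletions s out) := by unfold Spec_getMaxDeletions; infer_instance

-- ===== CLAIM (what is proved, stated in full; the proofs are below) =====
def Claim_equal_getMaxDeletions : Prop := ∀ (s : String), Dom_getMaxDeletions s → Spec_getMaxDeletions s (getMaxDeletions s)

-- ===== LEMMAS AND PROOFS =====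

-- A's fold just counts the four letters.
theorem pvFoldA (l : List Char) (u d r L : Int) :
    l.foldl pvStepA (u, d, r, L)
      = (u + l.count 'U', d + l.count 'D', r + l.count 'R', L + l.count 'L') := by
  induction l generalizing u d r L with
  | nil => simp
  | cons a t ih =>
    by_cases hU : a = 'U'
    · subst hU; simp [pvStepA, ih]; omega
    · by_cases hD : a = 'D'
      · subst hD; simp [pvStepA, ih]; omega
      · by_cases hR : a = 'R'
        · subst hR; simp [pvStepA, ih, hD]; omega
        · by_cases hL : a = 'L'
          · subst hL; simp [pvStepA, ih, hD, hR]; omega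
          · simp [pvStepA, hU, hD, hR, hL, ih]

-- Invariant of B's greedy cancellation fold: after any prefix, the deletions equal
-- 2·(matched U/D pairs + matched L/R pairs) and each pending counter is the surplus.
theorem pvFoldB (l : List Char) :
    l.foldl pvStepB (0, 0, 0, 0, 0)
      = (2 * min (l.count 'U' : Int) (l.count 'D' : Int)
          + 2 * min (l.count 'L' : Int) (l.count 'R' : Int),
         (l.count 'U' : Int) - min (l.count 'U' : Int) (l.count 'D' : Int),
         (l.count 'D' : Int) - min (l.count 'U' : Int) (l.count 'D' : Int),
         (l.count 'L' : Int) - min (l.count 'L' : Int) (l.count 'R' : Int),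
         (l.count 'R' : Int) - min (l.count 'L' : Int) (l.count 'R' : Int)) := by
  induction l using List.reverseRecOn with
  | nil => simp
  | append_singleton t a ih =>
    rw [List.foldl_append, List.foldl_cons, List.foldl_nil, ih]
    by_cases hU : a = 'U'
    · subst hU; simp [pvStepB]; split_ifs <;> rw [Prod.mk.injEq, Prod.mk.injEq, Prod.mk.injEq, Prod.mk.injEq] <;> omega
    · by_cases hD : a = 'D'
      · subst hD; simp [pvStepB, hU]; split_ifs <;> rw [Prod.mk.injEq, Prod.mk.injEq, Prod.mk.injEq, Prod.mk.injEq] <;> omega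
      · by_cases hL : a = 'L'
        · subst hL; simp [pvStepB, hU, hD]; split_ifs <;> rw [Prod.mk.injEq, Prod.mk.injEq, Prod.mk.injEq, Prod.mk.injEq] <;> omega
        · by_cases hR : a = 'R'
          · subst hR; simp [pvStepB, hU, hD, hL]; split_ifs <;> rw [Prod.mk.injEq, Prod.mk.injEq, Prod.mk.injEq, Prod.mk.injEq] <;> omega
          · simp [pvStepB, hU, hD, hL, hR]

-- ===== VERDICT (by name: the statement is the Claim_ definition above) =====
theorem getMaxDeletions_spec : Claim_equal_getMaxDeletions := by
  intro s _
  unfold Spec_getMaxDeletions getMaxDeletions getMaxDeletions_alt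
  rw [pvFoldB]
  simp only [pvFoldA, zero_add, beq_iff_eq]
  split_ifs <;> omega
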